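-- pv_equiv track=rewrite | github.com/guestrin-lab/extractive-abstractive-spectrum | citation_systems/naturalQuestions.py | fix_punctuation_spacing
-- ===== SOURCE A (Python) =====
-- def fix_punctuation_spacing(references):
--     j=0
--     for reference in references:
--         list_reference = list(reference)
--         i = 0
--         while (i < len(list_reference)):
--             curr_char = list_reference[i]
--             if ((curr_char==',') or (curr_char=='.')
--                                  or (curr_char=='\'')
--                                  or (curr_char==')')
--                                  or (curr_char==':')
--                                  or (curr_char==';')
--                                  or (curr_char=='-')
--                                  or (curr_char=='%')):
--                 if ((i != 0) and list_reference[i-1]==' '):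
--                     del list_reference[i-1]
--                     i -= 1
--             if ((curr_char == '(') or (curr_char == '-')):
--                 if ((i != len(list_reference)-1) and list_reference[i+1]==' '):
--                     del list_reference[i+1]
--             if ((curr_char == '\'')):
--                 if ((i != len(list_reference)-1) and list_reference[i+1]=='\''):
--                     del list_reference[i+1]
--             i += 1
--         fixed_reference = "".join(list_reference)
--         references[j] = fixed_reference
--         j+=1
--     return references
-- ===== SOURCE B (Python) =====
-- # Single forward pass per string: pop a trailing space before punctuation, skip
-- # a space after '('/'-' and a duplicate "'", instead of repeated in-place del.
-- # Like A, it rewrites the input list in place and returns it.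
-- def fix_punctuation_spacing(references):
--     for j in range(len(references)):
--         reference = references[j]
--         out = []
--         i = 0
--         n = len(reference)
--         while i < n:
--             c = reference[i]
--             if c in ",.'):;-%" and out and out[-1] == ' ':
--                 out.pop()
--             out.append(c)
--             if i + 1 < n and ((c in "(-" and reference[i+1] == ' ')
--                               or (c == "'" and reference[i+1] == "'")):
--                 i += 1
--             i += 1
--         references[j] = ''.join(out)
--     return references
-- ===== Notes on version B (the rewrite author's own statement) =====
-- stated objective: alternative
-- what changed: Replaces A's in-place scan with repeated list `del` (each an O(n) shift, quadratic in the worst case) by a single forward pass that builds the output with an accumulator, popping its last element before punctuation and skipping a duplicate/space character after '(' , '-' and the apostrophe.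
import Mathlib
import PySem

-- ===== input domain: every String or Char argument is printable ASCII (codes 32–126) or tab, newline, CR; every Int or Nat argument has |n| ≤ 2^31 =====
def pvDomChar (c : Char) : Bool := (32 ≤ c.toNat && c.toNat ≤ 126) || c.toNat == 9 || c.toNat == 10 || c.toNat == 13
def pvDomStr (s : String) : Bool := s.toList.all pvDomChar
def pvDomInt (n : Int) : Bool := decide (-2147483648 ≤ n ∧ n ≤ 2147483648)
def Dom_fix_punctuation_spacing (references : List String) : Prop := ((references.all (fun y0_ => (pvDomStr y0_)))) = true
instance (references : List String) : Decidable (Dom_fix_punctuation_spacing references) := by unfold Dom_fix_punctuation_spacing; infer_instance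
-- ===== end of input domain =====

-- B replaces A's in-place `del` loop by a single forward pass with a pop-last /
-- skip-next accumulator (same return value; both Pythons rewrite the list in place).

-- ===== PORT A =====
-- A's while loop over the mutable character list with index i; each `del` is an
-- eraseIdx.  The fuel argument (length of the string, one unit per iteration;
-- each iteration advances past at least one original character) only makes the
-- recursion structural; it is never exhausted.
def pvLoopA : Nat → List Char → Nat → List Char
  | 0, l, _ => l
  | fuel + 1, l, i =>
    if i < l.length then
      let c := l.getD i ' '
      let l1 := if (c = ',' ∨ c = '.' ∨ c = '\'' ∨ c = ')' ∨ c = ':' ∨ c = ';' ∨ c = '-' ∨ c = '%') ∧ i ≠ 0 ∧ l.getD (i-1) ' ' = ' ' then l.eraseIdx (i-1) else l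
      let i1 := if (c = ',' ∨ c = '.' ∨ c = '\'' ∨ c = ')' ∨ c = ':' ∨ c = ';' ∨ c = '-' ∨ c = '%') ∧ i ≠ 0 ∧ l.getD (i-1) ' ' = ' ' then i - 1 else i
      let l2 := if (c = '(' ∨ c = '-') ∧ i1 ≠ l1.length - 1 ∧ l1.getD (i1+1) ' ' = ' '
                then l1.eraseIdx (i1+1) else l1
      let l3 := if c = '\'' ∧ i1 ≠ l2.length - 1 ∧ l2.getD (i1+1) ' ' = '\''
                then l2.eraseIdx (i1+1) else l2
      pvLoopA fuel l3 (i1 + 1)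
    else l

def fix_punctuation_spacing (references : List String) : List String :=
  references.map (fun reference => String.ofList (pvLoopA reference.toList.length reference.toList 0))

-- ===== PORT B =====
-- B's forward pass; `out` is the accumulator kept reversed (head? = out[-1],
-- tail = pop).  Same structural fuel (≥ remaining input, never exhausted).
def pvLoopB : Nat → List Char → List Char → List Char
  | _, [], out => out.reverse
  | 0, _ :: _, out => out.reverse
  | fuel + 1, c :: rest, out =>
    let out2 := c :: (if [',', '.', '\'', ')', ':', ';', '-', '%'].contains c ∧ out.head? = some ' '
                      then out.tail else out)
    if (['(', '-'].contains c ∧ rest.head? = some ' ') ∨ (c = '\'' ∧ rest.head? = some '\'')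
    then pvLoopB fuel rest.tail out2
    else pvLoopB fuel rest out2

def fix_punctuation_spacing_alt (references : List String) : List String :=
  references.map (fun reference => String.ofList (pvLoopB reference.toList.length reference.toList []))

-- ===== PRECONDITION & SPEC =====
def Spec_fix_punctuation_spacing (references : List String) (out : List String) : Prop := out = fix_punctuation_spacing_alt references
instance (references : List String) (out : List String) : Decidable (Spec_fix_punctuation_spacing references out) := by unfold Spec_fix_punctuation_spacing; infer_instance

-- ===== CLAIM (what is proved, stated in full; the proofs are below) =====
def Claim_equal_fix_punctuation_spacing : Prop := ∀ (references : List String), Dom_fix_punctuation_spacing references → Spec_fix_punctuation_spacing references (fix_punctuation_spacing references)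

-- ===== LEMMAS AND PROOFS =====

lemma pv_contains_punct (c : Char) :
    ([',', '.', '\'', ')', ':', ';', '-', '%'].contains c = true) ↔ (c = ',' ∨ c = '.' ∨ c = '\'' ∨ c = ')' ∨ c = ':' ∨ c = ';' ∨ c = '-' ∨ c = '%') := by
  simp

lemma pv_contains_open (c : Char) :
    (['(', '-'].contains c = true) ↔ (c = '(' ∨ c = '-') := by
  simp

lemma pv_getD_mid (out rem : List Char) (c d : Char) :
    (out.reverse ++ c :: rem).getD out.length d = c := by
  simp [List.getD_eq_getElem?_getD]

lemma pv_getD_prev (os rem : List Char) (o c d : Char) :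
    ((o :: os).reverse ++ c :: rem).getD ((o :: os).length - 1) d = o := by
  simp [List.getD_eq_getElem?_getD]

lemma pv_erase_prev (os rem : List Char) (o c : Char) :
    ((o :: os).reverse ++ c :: rem).eraseIdx ((o :: os).length - 1) = os.reverse ++ c :: rem := by
  simp only [List.reverse_cons, List.length_cons, Nat.add_sub_cancel, List.append_assoc]
  rw [List.eraseIdx_append]
  simp

lemma pv_getD_next (out rest : List Char) (c d e : Char) :
    (out.reverse ++ c :: d :: rest).getD (out.length + 1) e = d := by
  have h : out.reverse ++ c :: d :: rest = (out.reverse ++ [c]) ++ d :: rest := by simp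
  rw [h, List.getD_eq_getElem?_getD, List.getElem?_append_right (by simp)]
  simp

lemma pv_erase_next (out rest : List Char) (c d : Char) :
    (out.reverse ++ c :: d :: rest).eraseIdx (out.length + 1) = out.reverse ++ c :: rest := by
  have h : out.reverse ++ c :: d :: rest = (out.reverse ++ [c]) ++ d :: rest := by simp
  rw [h, List.eraseIdx_append]
  simp

-- the invariant: A's state (list, index) is B's (reversed accumulator, remaining input)
lemma pv_key : ∀ n (rem out : List Char), rem.length ≤ n →
    pvLoopA n (out.reverse ++ rem) out.length = pvLoopB n rem out := by
  intro n
  induction n with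
  | zero =>
    intro rem out h
    have hrem : rem = [] := List.eq_nil_of_length_eq_zero (Nat.le_zero.mp h)
    subst hrem
    simp [pvLoopA, pvLoopB]
  | succ n ih =>
    intro rem out h
    cases rem with
    | nil =>
      simp [pvLoopA, pvLoopB]
    | cons c rest =>
      have hrn : rest.length ≤ n := by simpa using h
      simp only [pvLoopA, if_pos (show out.length < (out.reverse ++ c :: rest).length by simp)]
      simp only [pv_getD_mid]
      -- steps 2 and 3 of A's body, for an arbitrary accumulator out1 (B: out2 = c :: out1)
      have step23 : ∀ out1 : List Char,
          pvLoopA n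
            (let l1 := out1.reverse ++ c :: rest
             let l2 := if (c = '(' ∨ c = '-') ∧ out1.length ≠ l1.length - 1 ∧ l1.getD (out1.length + 1) ' ' = ' '
                       then l1.eraseIdx (out1.length + 1) else l1
             if c = '\'' ∧ out1.length ≠ l2.length - 1 ∧ l2.getD (out1.length + 1) ' ' = '\''
             then l2.eraseIdx (out1.length + 1) else l2)
            (out1.length + 1)
          = if ((['(', '-'].contains c = true) ∧ rest.head? = some ' ') ∨ (c = '\'' ∧ rest.head? = some '\'')
            then pvLoopB n rest.tail (c :: out1)
            else pvLoopB n rest (c :: out1) := by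
        intro out1
        dsimp only
        cases rest with
        | nil =>
          rw [if_neg (by simp : ¬ ((c = '(' ∨ c = '-') ∧ out1.length ≠ (out1.reverse ++ [c]).length - 1 ∧ (out1.reverse ++ [c]).getD (out1.length + 1) ' ' = ' '))]
          rw [if_neg (by simp : ¬ (c = '\'' ∧ out1.length ≠ (out1.reverse ++ [c]).length - 1 ∧ (out1.reverse ++ [c]).getD (out1.length + 1) ' ' = '\''))]
          rw [if_neg (by simp : ¬ (((['(', '-'].contains c = true) ∧ ([] : List Char).head? = some ' ') ∨ (c = '\'' ∧ ([] : List Char).head? = some '\'')))]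
          have := ih [] (c :: out1) (by omega)
          simpa using this
        | cons d rest' =>
          have hne : out1.length ≠ (out1.reverse ++ c :: d :: rest').length - 1 := by simp
          have hr' : rest'.length ≤ n := by simp at hrn; omega
          by_cases h2 : (c = '(' ∨ c = '-') ∧ out1.length ≠ (out1.reverse ++ c :: d :: rest').length - 1 ∧ (out1.reverse ++ c :: d :: rest').getD (out1.length + 1) ' ' = ' '
          · have hd : d = ' ' := by have h22 := h2.2.2; rwa [pv_getD_next] at h22
            have hc' : c ≠ '\'' := by rcases h2.1 with hh | hh <;> subst hh <;> decide
            rw [if_pos h2, pv_erase_next]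
            rw [if_neg (fun hh => hc' hh.1)]
            rw [if_pos (Or.inl ⟨(pv_contains_open c).mpr h2.1, by simp [hd]⟩)]
            simp only [List.tail_cons]
            have := ih rest' (c :: out1) hr'
            simpa using this
          · rw [if_neg h2]
            by_cases h3 : c = '\'' ∧ out1.length ≠ (out1.reverse ++ c :: d :: rest').length - 1 ∧ (out1.reverse ++ c :: d :: rest').getD (out1.length + 1) ' ' = '\''
            · have hd : d = '\'' := by have h32 := h3.2.2; rwa [pv_getD_next] at h32
              rw [if_pos h3, pv_erase_next]
              rw [if_pos (Or.inr ⟨h3.1, by simp [hd]⟩)]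
              simp only [List.tail_cons]
              have := ih rest' (c :: out1) hr'
              simpa using this
            · rw [if_neg h3]
              have hB : ¬ (((['(', '-'].contains c = true) ∧ (d :: rest').head? = some ' ') ∨ (c = '\'' ∧ (d :: rest').head? = some '\'')) := by
                rintro (⟨hA, hd⟩ | ⟨hA, hd⟩)
                · exact h2 ⟨(pv_contains_open c).mp hA, hne, by rw [pv_getD_next]; simpa using hd⟩
                · exact h3 ⟨hA, hne, by rw [pv_getD_next]; simpa using hd⟩
              rw [if_neg hB]
              have := ih (d :: rest') (c :: out1) hrn
              simpa using this
      by_cases hp : (c = ',' ∨ c = '.' ∨ c = '\'' ∨ c = ')' ∨ c = ':' ∨ c = ';' ∨ c = '-' ∨ c = '%') ∧ out.length ≠ 0 ∧ (out.reverse ++ c :: rest).getD (out.length - 1) ' ' = ' '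
      · cases out with
        | nil => exact absurd hp.2.1 (by simp)
        | cons o os =>
          have ho : o = ' ' := by have hpp := hp.2.2; rwa [pv_getD_prev] at hpp
          subst ho
          simp only [if_pos hp]
          rw [pv_erase_prev]
          simp only [List.length_cons, Nat.add_sub_cancel]
          simp only [pvLoopB]
          rw [if_pos (show ([',', '.', '\'', ')', ':', ';', '-', '%'].contains c = true) ∧ (' ' :: os : List Char).head? = some ' ' from ⟨(pv_contains_punct c).mpr hp.1, rfl⟩)]
          dsimp only [List.tail_cons]
          exact step23 os
      · simp only [if_neg hp]
        have hB : ¬ (([',', '.', '\'', ')', ':', ';', '-', '%'].contains c = true) ∧ out.head? = some ' ') := by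
          intro hcon
          apply hp
          refine ⟨(pv_contains_punct c).mp hcon.1, ?_⟩
          match out, hcon with
          | o :: os, hcon =>
            have ho : o = ' ' := by simpa using hcon.2
            subst ho
            exact ⟨by simp, by rw [pv_getD_prev]⟩
        simp only [pvLoopB]
        rw [if_neg hB]
        exact step23 out

theorem pv_main (l : List Char) : pvLoopA l.length l 0 = pvLoopB l.length l [] := by
  simpa using pv_key l.length l [] le_rfl

-- ===== VERDICT (by name: the statement is the Claim_ definition above) =====
theorem fix_punctuation_spacing_spec : Claim_equal_fix_punctuation_spacing := by
  intro references _
  unfold Spec_fix_punctuation_spacing fix_punctuation_spacing fix_punctuation_spacing_alt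
  exact List.map_congr_left (fun a _ => by rw [pv_main])
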